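-- pv_equiv track=rewrite | github.com/sara5885/CodingTest | 250905/2개 이상의 알파벳/more-than-one-alphabet.py | check_arr
-- ===== SOURCE A (Python) =====
-- def check_arr(A):
--     new_arr=[]
--     for i in range(len(A)):
--         if A[i] not in new_arr:
--             new_arr.append(A[i])
--     if len(new_arr)>=2:
--         return "Yes"
--     else:
--         return "No"
-- ===== SOURCE B (Python) =====
-- def check_arr(A):
--     # Yes iff some element differs from the first element (short-circuit scan, no aux list)
--     return "Yes" if A and any(x != A[0] for x in A) else "No"
-- ===== Notes on version B (the rewrite author's own statement) =====
-- stated objective: simpler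
-- what changed: Replaced the build-a-distinct-list-then-count approach by a single short-circuiting scan comparing each element to the first element.
import Mathlib
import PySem

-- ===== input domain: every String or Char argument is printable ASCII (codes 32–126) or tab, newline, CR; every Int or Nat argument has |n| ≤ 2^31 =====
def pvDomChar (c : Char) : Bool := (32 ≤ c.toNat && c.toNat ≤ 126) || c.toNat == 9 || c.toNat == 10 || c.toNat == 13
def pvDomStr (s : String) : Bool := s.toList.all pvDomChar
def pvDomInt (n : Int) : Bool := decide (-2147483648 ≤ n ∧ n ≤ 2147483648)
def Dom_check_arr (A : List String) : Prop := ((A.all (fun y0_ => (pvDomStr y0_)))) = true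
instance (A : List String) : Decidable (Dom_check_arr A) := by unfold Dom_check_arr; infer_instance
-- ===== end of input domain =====

-- B replaces A's distinct-list accumulation and count by a single short-circuiting scan
-- comparing each element against the first element (simpler, one pass).


-- ===== PORT A =====
-- loop over A's elements in order (range(len(A)) with A[i] visits exactly the elements),
-- appending each unseen element to new_arr, then test len(new_arr) >= 2
def check_arr (A : List String) : String :=
  let new_arr := A.foldl (fun acc x => if x ∈ acc then acc else acc ++ [x]) []
  if 2 ≤ new_arr.length then "Yes" else "No"

-- ===== PORT B =====
def check_arr_alt (A : List String) : String :=
  match A with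
  | [] => "No"
  | h :: t => if t.any (fun x => x ≠ h) then "Yes" else "No"

-- ===== PRECONDITION & SPEC =====
def Spec_check_arr (A : List String) (out : String) : Prop := out = check_arr_alt A
instance (A : List String) (out : String) : Decidable (Spec_check_arr A out) := by unfold Spec_check_arr; infer_instance

-- ===== CLAIM (what is proved, stated in full; the proofs are below) =====
def Claim_equal_check_arr : Prop := ∀ (A : List String), Dom_check_arr A → Spec_check_arr A (check_arr A)

-- ===== LEMMAS AND PROOFS =====
theorem pv_fold_mono (t : List String) (acc : List String) :
    acc.length ≤ (t.foldl (fun acc x => if x ∈ acc then acc else acc ++ [x]) acc).length := by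
  induction t generalizing acc with
  | nil => simp
  | cons x t ih =>
      simp only [List.foldl_cons]
      split
      · exact ih acc
      · exact le_trans (by simp) (ih (acc ++ [x]))

theorem pv_fold_const (t : List String) (h : String)
    (hall : ∀ x ∈ t, x = h) :
    t.foldl (fun acc x => if x ∈ acc then acc else acc ++ [x]) [h] = [h] := by
  induction t with
  | nil => rfl
  | cons x t ih =>
      have hx : x = h := hall x (by simp)
      simp only [List.foldl_cons, hx, List.mem_singleton]
      exact ih (fun y hy => hall y (by simp [hy]))

theorem pv_fold_two (t : List String) (h : String)
    (hx : ∃ x ∈ t, x ≠ h) :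
    2 ≤ (t.foldl (fun acc x => if x ∈ acc then acc else acc ++ [x]) [h]).length := by
  induction t with
  | nil => simp at hx
  | cons y t ih =>
      simp only [List.foldl_cons]
      by_cases hy : y ∈ ([h] : List String)
      · simp only [if_pos hy]
        apply ih
        rcases hx with ⟨x, hmem, hne⟩
        rcases List.mem_cons.mp hmem with rfl | hmem'
        · exact absurd (List.mem_singleton.mp hy) hne
        · exact ⟨x, hmem', hne⟩
      · simp only [if_neg hy]
        exact le_trans (by simp) (pv_fold_mono t ([h] ++ [y]))

-- ===== VERDICT (by name: the statement is the Claim_ definition above) =====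
theorem check_arr_spec : Claim_equal_check_arr := by
  intro A _
  unfold Spec_check_arr check_arr check_arr_alt
  cases A with
  | nil => rfl
  | cons h t =>
      have e1 : (List.foldl (fun acc x => if x ∈ acc then acc else acc ++ [x]) [] (h :: t))
          = List.foldl (fun acc x => if x ∈ acc then acc else acc ++ [x]) [h] t := by
        simp
      simp only [e1]
      cases ht : t.any (fun x => x ≠ h) with
      | true =>
          obtain ⟨x, hm, hne⟩ := List.any_eq_true.mp ht
          have h2 := pv_fold_two t h ⟨x, hm, by simpa using hne⟩
          rw [if_pos h2]
          rfl
      | false =>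
          have hall : ∀ x ∈ t, x = h := fun x hm => by
            simpa using List.any_eq_false.mp ht x hm
          rw [pv_fold_const t h hall]
          rfl
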